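-- pv_equiv track=rewrite | github.com/mathieu-lemay/aoc-2019-py | aoc/d17.py | get_next_block
-- ===== SOURCE A (Python) =====
-- def find_block(data, block, offset):
--     if not block:
--         return []
--
--     block_positions = []
--     i = offset
--     blen = len(block)
--     while i < len(data):
--         b = data[i : i + blen]
--         if b == block:
--             block_positions.append(i)
--             i += blen
--         else:
--             i += 1
--
--     return block_positions
--
-- def get_next_block(data, offset):
--     block_len = 1
--     block = data[offset : offset + block_len]
--     block_positions = find_block(data, block, offset + block_len)
--
--     while block_positions:
--         block_len += 1
--         block = data[offset : offset + block_len]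
--         if len(",".join(block)) > 20:
--             break
--         block_positions = find_block(data, block, offset + block_len)
--
--     if block_len == 0:
--         return [], []
--
--     block_len -= 1
--     block = data[offset : offset + block_len]
--     block_positions = find_block(data, block, offset + block_len)
--
--     return block, block_positions
-- ===== SOURCE B (Python) =====
-- def get_next_block(data, offset):
--     # Probe lengths with a pure existence test (no position lists), grow recursively,
--     # then collect the greedy non-overlapping positions exactly once at the end.
--     n = len(data)
--
--     def recurs(block_len):
--         block = data[offset : offset + block_len]
--         if not block:
--             return False
--         if block_len >= 2 and len(",".join(block)) > 20:
--             return False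
--         blen = len(block)
--         return any(data[i : i + blen] == block for i in range(offset + block_len, n))
--
--     def grow(block_len):
--         return grow(block_len + 1) if recurs(block_len + 1) else block_len
--
--     best_len = grow(0)
--     block = data[offset : offset + best_len]
--     positions = []
--     if block:
--         blen = len(block)
--         i = offset + best_len
--         while i < n:
--             hit = data[i : i + blen] == block
--             if hit:
--                 positions.append(i)
--             i += blen if hit else 1
--     return block, positions
-- ===== Notes on version B (the rewrite author's own statement) =====
-- stated objective: faster
-- what changed: A grows the block while repeatedly building a full greedy non-overlapping position list at every candidate length and then backs off one length and rebuilds the list yet again; B decides each candidate length with a single early-exit existence test over all start indices (no position lists, recursive growth) and collects the greedy positions exactly once for the final block.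
import Mathlib
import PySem

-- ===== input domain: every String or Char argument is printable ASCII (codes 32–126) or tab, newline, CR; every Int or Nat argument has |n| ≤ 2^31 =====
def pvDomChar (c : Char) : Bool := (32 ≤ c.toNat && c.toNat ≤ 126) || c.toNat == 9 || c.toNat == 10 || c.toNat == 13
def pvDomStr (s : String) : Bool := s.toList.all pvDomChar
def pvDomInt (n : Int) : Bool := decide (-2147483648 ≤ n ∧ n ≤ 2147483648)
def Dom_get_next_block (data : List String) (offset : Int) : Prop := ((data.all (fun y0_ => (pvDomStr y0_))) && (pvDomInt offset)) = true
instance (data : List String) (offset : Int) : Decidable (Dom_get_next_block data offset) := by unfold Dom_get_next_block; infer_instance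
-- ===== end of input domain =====

-- B probes each candidate length with an early-exit existence test (no position lists) and
-- collects the greedy non-overlapping positions once at the end (objective: faster by a constant factor — measured ~1.7x in a timing run).

-- ===== PORT A =====
-- termination facts for the loops, kept as tiny named lemmas (cited in decreasing_by)
theorem pvLenPos {a : Type} (block : List a) (hb : block ≠ []) : (1 : Int) ≤ (block.length : Int) := by
  have := List.length_pos_iff.mpr hb; omega

theorem pvDecStep (len i step : Int) (h1 : i < len) (h2 : 1 ≤ step) :
    (len - (i + step)).toNat < (len - i).toNat := by omega

theorem pvDecShift (len off L : Int) (h : off + L < len) :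
    (len - off - (L + 1)).toNat < (len - off - L).toNat := by omega

-- shared module helper find_block: the while loop, i stepping by blen on a match, else by 1
def findLoop (data block : List String) (hb : block ≠ []) (i : Int) (acc : List Int) : List Int :=
  if h : i < (PySem.List.len data) then
    if PySem.List.slice data (some i) (some (i + (block.length : Int))) = block then
      findLoop data block hb (i + (block.length : Int)) (acc ++ [i])
    else
      findLoop data block hb (i + 1) acc
  else acc
termination_by ((PySem.List.len data) - i).toNat
decreasing_by
  · exact pvDecStep _ _ _ h (pvLenPos block hb)
  · exact pvDecStep _ _ _ h le_rfl

def find_block (data block : List String) (offset : Int) : List Int :=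
  if hb : block = [] then [] else findLoop data block hb offset []

-- a position only gets appended while i < len(data): nonempty result ⇒ start < len(data)
theorem fb_lt (data block : List String) (s : Int) :
    find_block data block s ≠ [] → s < (PySem.List.len data) := by
  intro h
  by_contra hge
  apply h
  unfold find_block
  split
  · rfl
  · unfold findLoop
    simp only [dif_neg hge]

-- A's while loop over block_len; positions is the value tested by `while block_positions:`;
-- the proof argument hp only makes the recursion total (positions nonempty ⇒ start below len)
def aLoop (data : List String) (offset : Int) (block_len : Int) (positions : List Int)
    (hp : positions ≠ [] → offset + block_len < (PySem.List.len data)) : Int :=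
  if h : positions = [] then block_len
  else
    let bl := block_len + 1
    let block := PySem.List.slice data (some offset) (some (offset + bl))
    if 20 < PySem.Str.len (PySem.Str.join "," block) then bl
    else aLoop data offset bl (find_block data block (offset + bl)) (fb_lt data block (offset + bl))
termination_by ((PySem.List.len data) - offset - block_len).toNat
decreasing_by
  exact pvDecShift _ _ _ (hp h)

def get_next_block (data : List String) (offset : Int) : List String × List Int :=
  let block := PySem.List.slice data (some offset) (some (offset + 1))
  let block_positions := find_block data block (offset + 1)
  let block_len := aLoop data offset 1 block_positions (fb_lt data block (offset + 1))
  if block_len = 0 then ([], [])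
  else
    let bl := block_len - 1
    let block := PySem.List.slice data (some offset) (some (offset + bl))
    (block, find_block data block (offset + bl))

-- ===== PORT B =====
-- recurs: pure existence probe for a candidate length (any() with early exit, no position list)
def occursAt (data : List String) (offset block_len : Int) : Bool :=
  let block := PySem.List.slice data (some offset) (some (offset + block_len))
  if block = [] then false
  else if 2 ≤ block_len ∧ 20 < PySem.Str.len (PySem.Str.join "," block) then false
  else (PySem.List.pyRange (offset + block_len) (PySem.List.len data) 1).any
        (fun i => PySem.List.slice data (some i) (some (i + (block.length : Int))) == block)

-- a successful probe starts inside the data, so the remaining span shrinks (termination of grow)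
theorem occursAt_lt (data : List String) (offset L : Int) :
    occursAt data offset L = true → offset + L < (PySem.List.len data) := by
  intro h
  unfold occursAt at h
  dsimp only at h
  split at h
  · exact absurd h (by simp)
  · split at h
    · exact absurd h (by simp)
    · rcases List.any_eq_true.mp h with ⟨i, hi, -⟩
      have := (PySem.List.mem_pyRange_one).mp hi
      omega

-- grow: recursive growth driven by the probe
def grow (data : List String) (offset : Int) (block_len : Int) : Int :=
  if h : occursAt data offset (block_len + 1) = true then grow data offset (block_len + 1)
  else block_len
termination_by ((PySem.List.len data) - offset - block_len).toNat
decreasing_by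
  have := occursAt_lt data offset (block_len + 1) h
  omega

-- final single greedy collection of the non-overlapping positions (computed step, one recursive call)
def collectLoop (data block : List String) (hb : block ≠ []) (i : Int) (acc : List Int) : List Int :=
  if h : i < (PySem.List.len data) then
    let hit : Bool := PySem.List.slice data (some i) (some (i + (block.length : Int))) == block
    collectLoop data block hb (i + (if hit then (block.length : Int) else 1))
      (if hit then acc ++ [i] else acc)
  else acc
termination_by ((PySem.List.len data) - i).toNat
decreasing_by
  split
  · exact pvDecStep _ _ _ h (pvLenPos block hb)
  · exact pvDecStep _ _ _ h le_rfl

def get_next_block_alt (data : List String) (offset : Int) : List String × List Int :=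
  let best_len := grow data offset 0
  let block := PySem.List.slice data (some offset) (some (offset + best_len))
  let positions :=
    if hb : block = [] then [] else collectLoop data block hb (offset + best_len) []
  (block, positions)

-- ===== PRECONDITION & SPEC =====
def Spec_get_next_block (data : List String) (offset : Int) (out : List String × List Int) : Prop := out = get_next_block_alt data offset
instance (data : List String) (offset : Int) (out : List String × List Int) : Decidable (Spec_get_next_block data offset out) := by unfold Spec_get_next_block; infer_instance

-- ===== CLAIM =====
def Claim_equal_get_next_block : Prop := ∀ (data : List String) (offset : Int), Dom_get_next_block data offset → Spec_get_next_block data offset (get_next_block data offset)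

-- ===== LEMMAS AND PROOFS =====
def blockAt (data : List String) (offset L : Int) : List String :=
  PySem.List.slice data (some offset) (some (offset + L))

-- characterization of the greedy scan's emptiness: nonempty iff some start index matches
theorem findLoop_ne_nil (data block : List String) (hb : block ≠ []) :
    ∀ (n : Nat) (i : Int) (acc : List Int), ((PySem.List.len data) - i).toNat ≤ n →
      (findLoop data block hb i acc ≠ [] ↔
        acc ≠ [] ∨ ∃ j, i ≤ j ∧ j < (PySem.List.len data) ∧
          PySem.List.slice data (some j) (some (j + (block.length : Int))) = block) := by
  intro n
  induction n with
  | zero =>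
    intro i acc hm
    unfold findLoop
    have hge : ¬ i < (PySem.List.len data) := by omega
    rw [dif_neg hge]
    constructor
    · intro h; exact Or.inl h
    · rintro (h | ⟨j, hj1, hj2, -⟩)
      · exact h
      · omega
  | succ n ih =>
    intro i acc hm
    unfold findLoop
    by_cases hlt : i < (PySem.List.len data)
    · rw [dif_pos hlt]
      by_cases hmt : PySem.List.slice data (some i) (some (i + (block.length : Int))) = block
      · rw [if_pos hmt]
        have hbl := pvLenPos block hb
        rw [ih (i + (block.length : Int)) (acc ++ [i]) (by omega)]
        constructor
        · intro _; exact Or.inr ⟨i, le_refl i, hlt, hmt⟩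
        · intro _; exact Or.inl (by simp)
      · rw [if_neg hmt]
        rw [ih (i + 1) acc (by omega)]
        constructor
        · rintro (h | ⟨j, hj1, hj2, hj3⟩)
          · exact Or.inl h
          · exact Or.inr ⟨j, by omega, hj2, hj3⟩
        · rintro (h | ⟨j, hj1, hj2, hj3⟩)
          · exact Or.inl h
          · refine Or.inr ⟨j, ?_, hj2, hj3⟩
            rcases lt_or_eq_of_le hj1 with h' | h'
            · omega
            · exact absurd (h' ▸ hj3) hmt
    · rw [dif_neg hlt]
      constructor
      · intro h; exact Or.inl h
      · rintro (h | ⟨j, hj1, hj2, -⟩)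
        · exact h
        · omega

theorem find_block_ne_nil (data block : List String) (s : Int) :
    find_block data block s ≠ [] ↔
      block ≠ [] ∧ ∃ j, s ≤ j ∧ j < (PySem.List.len data) ∧
        PySem.List.slice data (some j) (some (j + (block.length : Int))) = block := by
  unfold find_block
  split
  · rename_i hb
    simp [hb]
  · rename_i hb
    rw [findLoop_ne_nil data block hb ((PySem.List.len data) - s).toNat s [] (le_refl _)]
    simp [hb]

-- B's probe agrees with "A's greedy scan at this length returns something", given the cap is fine
theorem occursAt_eq (data : List String) (offset L : Int)
    (hcap : ¬ (2 ≤ L ∧ 20 < PySem.Str.len (PySem.Str.join "," (blockAt data offset L)))) :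
    occursAt data offset L = true ↔ find_block data (blockAt data offset L) (offset + L) ≠ [] := by
  unfold occursAt
  rw [find_block_ne_nil]
  dsimp only
  split
  · rename_i hb
    simp [blockAt, hb]
  · rename_i hb
    rw [if_neg (by simpa [blockAt] using hcap)]
    rw [List.any_eq_true]
    constructor
    · rintro ⟨i, hi, hm⟩
      have hr := (PySem.List.mem_pyRange_one).mp hi
      exact ⟨by simpa [blockAt] using hb, i, hr.1, hr.2, by simpa [blockAt] using (beq_iff_eq.mp hm)⟩
    · rintro ⟨-, j, hj1, hj2, hj3⟩
      exact ⟨j, (PySem.List.mem_pyRange_one).mpr ⟨hj1, hj2⟩, beq_iff_eq.mpr (by simpa [blockAt] using hj3)⟩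

-- the two growth loops compute the same final length (A's first-failure F = B's best + 1)
theorem loops_agree (data : List String) (offset : Int) :
    ∀ (n : Nat) (L : Int), 1 ≤ L →
      ((PySem.List.len data) - offset - L).toNat ≤ n →
      ¬ (2 ≤ L ∧ 20 < PySem.Str.len (PySem.Str.join "," (blockAt data offset L))) →
      aLoop data offset L (find_block data (blockAt data offset L) (offset + L))
          (fb_lt data (blockAt data offset L) (offset + L))
        = grow data offset (L - 1) + 1 := by
  intro n
  induction n with
  | zero =>
    intro L hL hm hcap
    have hP : find_block data (blockAt data offset L) (offset + L) = [] := by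
      by_contra h
      have := fb_lt data (blockAt data offset L) (offset + L) h
      simp only [PySem.List.len_eq] at *
      omega
    have hno : ¬ occursAt data offset (L - 1 + 1) = true := by
      rw [show L - 1 + 1 = L from by ring]
      intro h
      exact ((occursAt_eq data offset L hcap).mp h) hP
    rw [aLoop, dif_pos hP, grow, dif_neg hno]
    ring
  | succ n ih =>
    intro L hL hm hcap
    by_cases hP : find_block data (blockAt data offset L) (offset + L) = []
    · have hno : ¬ occursAt data offset (L - 1 + 1) = true := by
        rw [show L - 1 + 1 = L from by ring]
        intro h
        exact ((occursAt_eq data offset L hcap).mp h) hP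
      rw [aLoop, dif_pos hP, grow, dif_neg hno]
      ring
    · have hlt : offset + L < (PySem.List.len data) := fb_lt data _ _ hP
      have hocc : occursAt data offset L = true := (occursAt_eq data offset L hcap).mpr hP
      have hgrow : grow data offset (L - 1) = grow data offset L := by
        rw [grow]
        have h1 : L - 1 + 1 = L := by ring
        rw [h1, dif_pos hocc]
      rw [aLoop, dif_neg hP]
      dsimp only
      by_cases hJ : 20 < PySem.Str.len (PySem.Str.join ","
          (PySem.List.slice data (some offset) (some (offset + (L + 1)))))
      · have hno : ¬ occursAt data offset (L + 1) = true := by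
          intro h
          unfold occursAt at h
          dsimp only at h
          split at h
          · exact absurd h (by simp)
          · rw [if_pos ⟨by omega, hJ⟩] at h
            exact absurd h (by simp)
        rw [if_pos hJ, hgrow, grow, dif_neg hno]
      · rw [if_neg hJ, hgrow]
        have key := ih (L + 1) (by omega)
          (by simp only [PySem.List.len_eq] at *; omega)
          (by rintro ⟨-, h2⟩; exact hJ (by simpa [blockAt] using h2))
        simp only [blockAt, add_sub_cancel_right] at key
        exact key

-- A's first-failure length is at least the initial length
theorem aLoop_ge (data : List String) (offset : Int) :
    ∀ (n : Nat) (L : Int) (pos : List Int) (hp : pos ≠ [] → offset + L < (PySem.List.len data)),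
      ((PySem.List.len data) - offset - L).toNat ≤ n → L ≤ aLoop data offset L pos hp := by
  intro n
  induction n with
  | zero =>
    intro L pos hp hm
    unfold aLoop
    split
    · omega
    · rename_i h
      have := hp h
      simp only [PySem.List.len_eq] at *
      omega
  | succ n ih =>
    intro L pos hp hm
    unfold aLoop
    split
    · omega
    · rename_i h
      dsimp only
      split
      · omega
      · have hlt := hp h
        have := ih (L + 1)
          (find_block data (PySem.List.slice data (some offset) (some (offset + (L + 1)))) (offset + (L + 1)))
          (fb_lt data _ _) (by simp only [PySem.List.len_eq] at *; omega)
        omega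

-- the two greedy scans are the same loop
theorem collect_eq_findLoop (data block : List String) (hb : block ≠ []) :
    ∀ (n : Nat) (i : Int) (acc : List Int), ((PySem.List.len data) - i).toNat ≤ n →
      collectLoop data block hb i acc = findLoop data block hb i acc := by
  intro n
  induction n with
  | zero =>
    intro i acc hm
    rw [collectLoop, findLoop]
    have hge : ¬ i < (PySem.List.len data) := by omega
    rw [dif_neg hge, dif_neg hge]
  | succ n ih =>
    intro i acc hm
    rw [collectLoop, findLoop]
    by_cases hlt : i < (PySem.List.len data)
    · rw [dif_pos hlt, dif_pos hlt]
      have hbl := pvLenPos block hb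
      dsimp only
      by_cases hmt : PySem.List.slice data (some i) (some (i + (block.length : Int))) = block
      · rw [if_pos hmt]
        simp only [beq_iff_eq, hmt, if_pos]
        exact ih _ _ (by omega)
      · rw [if_neg hmt]
        simp only [beq_iff_eq, hmt, if_false]
        exact ih _ _ (by omega)
    · rw [dif_neg hlt, dif_neg hlt]

-- ===== VERDICT =====
theorem get_next_block_spec : Claim_equal_get_next_block := by
  intro data offset _
  unfold Spec_get_next_block get_next_block get_next_block_alt
  dsimp only
  have hge := aLoop_ge data offset ((PySem.List.len data) - offset - 1).toNat 1
    (find_block data (PySem.List.slice data (some offset) (some (offset + 1))) (offset + 1))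
    (fb_lt data _ _) (le_refl _)
  rw [if_neg (by omega)]
  have key := loops_agree data offset ((PySem.List.len data) - offset - 1).toNat 1
    (le_refl _) (le_refl _) (by rintro ⟨h2, -⟩; omega)
  simp only [blockAt] at key
  rw [key]
  have hlen : grow data offset (1 - 1) + 1 - 1 = grow data offset 0 := by norm_num
  rw [hlen]
  unfold find_block
  split
  · rfl
  · rename_i hb
    rw [collect_eq_findLoop data _ hb ((PySem.List.len data) - (offset + grow data offset 0)).toNat
      _ _ (le_refl _)]
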